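-- pv_equiv track=rewrite | github.com/yuvan03/sequence-processing | string_mixer.py | mix_word
-- ===== SOURCE A (Python) =====
-- def mix_word(word_list):
--     word_list.sort()
--     new_words = []
--     while len(word_list) > 5:
--         new_words.append(word_list[-5])
--         word_list.pop(-5)
--         new_words.append(word_list[0])
--         word_list.pop(0)
--         new_words.append(word_list[-1])
--         word_list.pop(-1)
--     return new_words
-- ===== SOURCE B (Python) =====
-- def mix_word(word_list):
--     # Return-value equivalent to A; does not mutate word_list (A sorts and empties it in place).
--     s = sorted(word_list)
--     out = []
--     n = len(s)
--     if n <= 5: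
--         return out
--     lo, hi = 0, n - 5
--     tail = s[n - 5:]          # the five largest remaining words
--     rem = n
--     while rem > 5:
--         out.append(tail[0])   # 5th from the end
--         out.append(s[lo])     # smallest remaining
--         lo += 1
--         out.append(tail[-1])  # largest remaining
--         tail = tail[1:-1]
--         rem -= 3
--         while len(tail) < 5 and lo < hi:
--             hi -= 1
--             tail.insert(0, s[hi])
--     return out
-- ===== Notes on version B (the rewrite author's own statement) =====
-- stated objective: faster
-- what changed: Instead of repeatedly popping from the middle/front/back of a shrinking list (each pop O(n)), B sorts once and then walks two indices over the sorted array while maintaining only the 5-element tail window, so each iteration is O(1).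
import Mathlib
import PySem

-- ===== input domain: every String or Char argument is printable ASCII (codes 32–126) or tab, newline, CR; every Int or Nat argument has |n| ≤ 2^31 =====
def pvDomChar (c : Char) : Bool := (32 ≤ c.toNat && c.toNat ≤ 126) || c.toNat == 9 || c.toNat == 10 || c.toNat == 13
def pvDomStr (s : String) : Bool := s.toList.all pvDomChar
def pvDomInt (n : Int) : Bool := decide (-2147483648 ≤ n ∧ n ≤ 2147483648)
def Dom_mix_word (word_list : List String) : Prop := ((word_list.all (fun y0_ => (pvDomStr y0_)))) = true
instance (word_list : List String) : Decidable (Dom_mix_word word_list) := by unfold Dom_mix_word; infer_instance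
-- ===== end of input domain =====

-- B replaces A's repeated O(n) pops (front / back / 5th-from-end) on a shrinking list by a single
-- sort plus two index pointers over the sorted array with a 5-element tail window (objective: faster).
-- A sorts and empties its argument in place; the equivalence proved here is about the RETURN value only
-- (the Lean ports take the list by value).

-- ===== PORT A =====
-- word_list.pop(i) : the list after removing the element at Python index i (identity if out of range,
-- which never happens in A's loop since indices are checked by the loop guard).
def popAt (xs : List String) (i : Int) : List String :=
  ((PySem.List.pop? xs i).map Prod.snd).getD xs

-- termination helpers for the A-loop (cited in decreasing_by)
theorem popAt_neg_ofNat (xs : List String) (k : Nat) (h0 : 0 < k) (h : k ≤ xs.length) :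
    popAt xs (-(k : Int)) = xs.eraseIdx (xs.length - k) := by
  unfold popAt PySem.List.pop? PySem.List.pyIdx?
  have hne : ¬ (0 ≤ -(k : Int)) := by omega
  have hge : -(xs.length : Int) ≤ -(k : Int) := by omega
  have hk : xs.length - k < xs.length := by omega
  simp only [hne, if_false, hge, if_true, neg_neg, Int.toNat_natCast]
  simp [List.getElem?_eq_getElem hk]

theorem popAt_zero (xs : List String) (h : xs ≠ []) : popAt xs 0 = xs.tail := by
  unfold popAt PySem.List.pop? PySem.List.pyIdx?
  have hlen : 0 < xs.length := List.length_pos_iff.mpr h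
  have h0 : (0 : Int) < (xs.length : Int) := by omega
  simp [h0, hlen, List.getElem?_eq_getElem hlen, List.eraseIdx_zero]

theorem popAt_chain_length (wl : List String) (h : 5 < wl.length) :
    (popAt (popAt (popAt wl (-5)) 0) (-1)).length + 3 = wl.length := by
  have e1 : popAt wl (-5) = wl.eraseIdx (wl.length - 5) := by
    have := popAt_neg_ofNat wl 5 (by omega) (by omega)
    simpa using this
  have l1 : (popAt wl (-5)).length + 1 = wl.length := by
    rw [e1, List.length_eraseIdx_of_lt (by omega)]; omega
  have hne : popAt wl (-5) ≠ [] := by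
    intro hc; rw [hc] at l1; simp at l1; omega
  have e2 : popAt (popAt wl (-5)) 0 = (popAt wl (-5)).tail := popAt_zero _ hne
  have l2 : (popAt (popAt wl (-5)) 0).length + 2 = wl.length := by
    rw [e2, List.length_tail]; omega
  have e3 : popAt (popAt (popAt wl (-5)) 0) (-1)
      = (popAt (popAt wl (-5)) 0).eraseIdx ((popAt (popAt wl (-5)) 0).length - 1) := by
    have := popAt_neg_ofNat (popAt (popAt wl (-5)) 0) 1 (by omega) (by omega)
    simpa using this
  rw [e3, List.length_eraseIdx_of_lt (by omega)]
  omega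

-- the while-loop of A: repeatedly emit wl[-5], wl[0], wl[-1] and pop each
def mixLoopA (wl : List String) (acc : List String) : List String :=
  if h : wl.length > 5 then
    let a := (PySem.List.pyGet? wl (-5)).getD ""
    let wl1 := popAt wl (-5)
    let b := (PySem.List.pyGet? wl1 0).getD ""
    let wl2 := popAt wl1 0
    let c := (PySem.List.pyGet? wl2 (-1)).getD ""
    let wl3 := popAt wl2 (-1)
    mixLoopA wl3 (acc ++ [a, b, c])
  else acc
termination_by wl.length
decreasing_by
  have := popAt_chain_length wl h
  omega

def mix_word (word_list : List String) : List String :=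
  mixLoopA (PySem.List.sorted word_list (fun x => x)) []

-- ===== PORT B =====
-- the inner refill loop of B: while len(tail) < 5 and lo < hi: hi -= 1; tail.insert(0, s[hi])
def mixFill (s : List String) (lo hi : Nat) (tl : List String) : Nat × List String :=
  if h : tl.length < 5 ∧ lo < hi then
    mixFill s lo (hi - 1) (s.getD (hi - 1) "" :: tl)
  else (hi, tl)
termination_by hi
decreasing_by omega

-- termination helper for the B-loop (cited in decreasing_by)
theorem mixFill_measure (s : List String) (lo : Nat) :
    ∀ (hi : Nat) (tl : List String),
      ((mixFill s lo hi tl).1 - lo) + (mixFill s lo hi tl).2.length ≤ (hi - lo) + tl.length := by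
  intro hi
  induction hi using Nat.strong_induction_on with
  | _ hi ih =>
    intro tl
    rw [mixFill]
    split
    · next h =>
      have := ih (hi - 1) (by omega) (s.getD (hi - 1) "" :: tl)
      simp only [List.length_cons] at this ⊢
      omega
    · simp

-- the main loop of B: lo/hi index into the sorted array s, tl is the current tail window
def mixLoopB (s : List String) (lo hi : Nat) (tl : List String) (acc : List String) : List String :=
  if (hi - lo) + tl.length > 5 then
    let a := tl.headD ""
    let b := s.getD lo ""
    let c := tl.getLastD ""
    let tl1 := (tl.drop 1).dropLast   -- tail[1:-1] (exact: Python's [1:-1] on any length)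
    let p := mixFill s (lo + 1) hi tl1
    mixLoopB s (lo + 1) p.1 p.2 (acc ++ [a, b, c])
  else acc
termination_by (hi - lo) + tl.length
decreasing_by
  have hm := mixFill_measure s (lo + 1) hi ((tl.drop 1).dropLast)
  simp only [List.length_dropLast, List.length_drop] at hm
  omega

def mix_word_alt (word_list : List String) : List String :=
  let s := PySem.List.sorted word_list (fun x => x)
  let n := s.length
  if n ≤ 5 then []
  else mixLoopB s 0 (n - 5) (s.drop (n - 5)) []   -- s[n-5:] = drop (n-5) (exact: 0 ≤ n-5 ≤ n here)

-- ===== PRECONDITION & SPEC =====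
def Spec_mix_word (word_list : List String) (out : List String) : Prop := out = mix_word_alt word_list
instance (word_list : List String) (out : List String) : Decidable (Spec_mix_word word_list out) := by unfold Spec_mix_word; infer_instance

-- ===== CLAIM (what is proved, stated in full; the proofs are below) =====
def Claim_equal_mix_word : Prop := ∀ (word_list : List String), Dom_mix_word word_list → Spec_mix_word word_list (mix_word word_list)

-- ===== LEMMAS AND PROOFS =====

-- (l1 ++ l2).eraseIdx (l1.length + k) = l1 ++ l2.eraseIdx k
theorem eraseIdx_append_len (l1 l2 : List String) (k : Nat) :
    (l1 ++ l2).eraseIdx (l1.length + k) = l1 ++ l2.eraseIdx k := by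
  induction l1 with
  | nil => simp
  | cons a t ih =>
    have h : (a :: t).length + k = (t.length + k) + 1 := by simp; omega
    rw [h, List.cons_append, List.eraseIdx_cons_succ, ih]
    simp

theorem len5_exists (l : List String) (h : l.length = 5) :
    ∃ a b c d e, l = [a, b, c, d, e] := by
  rcases l with _|⟨a,_|⟨b,_|⟨c,_|⟨d,_|⟨e,_|⟨f,r⟩⟩⟩⟩⟩⟩ <;>
    first
      | exact ⟨_, _, _, _, _, rfl⟩
      | (simp at h)

theorem mixFill_main (s : List String) (lo : Nat) :
    ∀ (hi : Nat) (tl : List String), lo ≤ hi → hi ≤ s.length → tl.length ≤ 5 →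
      lo ≤ (mixFill s lo hi tl).1 ∧ (mixFill s lo hi tl).1 ≤ hi ∧
      (mixFill s lo hi tl).2.length ≤ 5 ∧
      ((mixFill s lo hi tl).2.length = 5 ∨ (mixFill s lo hi tl).1 = lo) ∧
      (s.drop lo).take (hi - lo) ++ tl
        = (s.drop lo).take ((mixFill s lo hi tl).1 - lo) ++ (mixFill s lo hi tl).2 := by
  intro hi
  induction hi using Nat.strong_induction_on with
  | _ hi ih =>
    intro tl h1 h2 h3
    rw [mixFill]
    by_cases hcond : tl.length < 5 ∧ lo < hi
    · simp only [dif_pos hcond]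
      obtain ⟨hl5, hlh⟩ := hcond
      have ihr := ih (hi - 1) (by omega) (s.getD (hi - 1) "" :: tl) (by omega) (by omega)
        (by simp; omega)
      have hx : (s.drop lo).take (hi - lo)
          = (s.drop lo).take ((hi - 1) - lo) ++ [s.getD (hi - 1) ""] := by
        have hk : hi - lo = ((hi - 1) - lo) + 1 := by omega
        rw [hk, List.take_succ]
        have hidx : (s.drop lo)[(hi - 1) - lo]? = some (s.getD (hi - 1) "") := by
          rw [List.getElem?_drop]
          have hlt : lo + ((hi - 1) - lo) = hi - 1 := by omega
          rw [hlt, List.getElem?_eq_getElem (show hi - 1 < s.length by omega),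
            List.getD_eq_getElem s "" (show hi - 1 < s.length by omega)]
        rw [hidx]
        simp
      refine ⟨ihr.1, by have := ihr.2.1; omega, ihr.2.2.1, ihr.2.2.2.1, ?_⟩
      rw [hx, List.append_assoc]
      simpa using ihr.2.2.2.2
    · simp only [dif_neg hcond]
      have hc' : ¬ tl.length < 5 ∨ ¬ lo < hi := not_and_or.mp hcond
      refine ⟨h1, le_refl _, h3, ?_, by trivial⟩
      rcases hc' with h | h
      · left; omega
      · right; omega

theorem loop_equiv (s : List String) :
    ∀ (d lo hi : Nat) (tl acc : List String), hi - lo = d → lo ≤ hi → hi ≤ s.length →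
      tl.length ≤ 5 → (tl.length = 5 ∨ lo = hi) →
      mixLoopA ((s.drop lo).take (hi - lo) ++ tl) acc = mixLoopB s lo hi tl acc := by
  intro d
  induction d using Nat.strong_induction_on with
  | _ d ih =>
    intro lo hi tl acc hd h1 h2 h3 h4
    subst hd
    have hmidlen : ((s.drop lo).take (hi - lo)).length = hi - lo := by
      simp [List.length_take, List.length_drop]; omega
    have hwlen : ((s.drop lo).take (hi - lo) ++ tl).length = (hi - lo) + tl.length := by
      simp [List.length_append, hmidlen]
    rw [mixLoopA, mixLoopB]
    by_cases hc : (hi - lo) + tl.length > 5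
    · rw [dif_pos (by rw [hwlen]; exact hc), if_pos hc]
      have htl5 : tl.length = 5 := by
        rcases h4 with h4 | h4
        · exact h4
        · omega
      have hlolt : lo < hi := by omega
      have hlos : lo < s.length := by omega
      obtain ⟨t0, t1, t2, t3, t4, rfl⟩ := len5_exists tl htl5
      have hmid : (s.drop lo).take (hi - lo)
          = s[lo] :: (s.drop (lo + 1)).take (hi - (lo + 1)) := by
        rw [List.drop_eq_getElem_cons hlos, show hi - lo = (hi - (lo + 1)) + 1 by omega,
          List.take_succ_cons]
      have hmidlen' : ((s.drop (lo + 1)).take (hi - (lo + 1))).length = hi - (lo + 1) := by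
        simp [List.length_take, List.length_drop]; omega
      -- a = wl[-5] = t0
      have ha : PySem.List.pyGet? ((s.drop lo).take (hi - lo) ++ [t0, t1, t2, t3, t4]) (-5)
          = some t0 := by
        rw [PySem.List.pyGet?_neg_ofNat _ 5 (by omega) (by rw [hwlen]; simp)]
        have hi5 : ((s.drop lo).take (hi - lo) ++ [t0, t1, t2, t3, t4]).length - 5
            = ((s.drop lo).take (hi - lo)).length := by rw [hwlen, hmidlen]; simp
        rw [hi5, List.getElem?_append_right (le_refl _)]
        simp
      -- wl.pop(-5)
      have e1 : popAt ((s.drop lo).take (hi - lo) ++ [t0, t1, t2, t3, t4]) (-5)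
          = (s.drop lo).take (hi - lo) ++ [t1, t2, t3, t4] := by
        have hp := popAt_neg_ofNat ((s.drop lo).take (hi - lo) ++ [t0, t1, t2, t3, t4]) 5
          (by omega) (by rw [hwlen]; simp)
        have hi5 : ((s.drop lo).take (hi - lo) ++ [t0, t1, t2, t3, t4]).length - 5
            = ((s.drop lo).take (hi - lo)).length + 0 := by rw [hwlen, hmidlen]; simp
        rw [hi5, eraseIdx_append_len] at hp
        simpa using hp
      -- b = wl1[0] = s[lo]
      have hb : PySem.List.pyGet? ((s.drop lo).take (hi - lo) ++ [t1, t2, t3, t4]) 0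
          = some s[lo] := by
        rw [hmid, List.cons_append, PySem.List.pyGet?_zero_cons]
      -- wl1.pop(0)
      have e2 : popAt ((s.drop lo).take (hi - lo) ++ [t1, t2, t3, t4]) 0
          = (s.drop (lo + 1)).take (hi - (lo + 1)) ++ [t1, t2, t3, t4] := by
        rw [hmid, List.cons_append, popAt_zero _ (by simp), List.tail_cons]
      -- c = wl2[-1] = t4
      have hcc : PySem.List.pyGet?
          ((s.drop (lo + 1)).take (hi - (lo + 1)) ++ [t1, t2, t3, t4]) (-1) = some t4 := by
        rw [PySem.List.pyGet?_neg_one, List.getLast?_append]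
        simp
      -- wl2.pop(-1)
      have e3 : popAt ((s.drop (lo + 1)).take (hi - (lo + 1)) ++ [t1, t2, t3, t4]) (-1)
          = (s.drop (lo + 1)).take (hi - (lo + 1)) ++ [t1, t2, t3] := by
        have hassoc : (s.drop (lo + 1)).take (hi - (lo + 1)) ++ [t1, t2, t3, t4]
            = ((s.drop (lo + 1)).take (hi - (lo + 1)) ++ [t1, t2, t3]) ++ [t4] := by simp
        have hp := popAt_neg_ofNat
          ((s.drop (lo + 1)).take (hi - (lo + 1)) ++ [t1, t2, t3, t4]) 1 (by omega) (by simp)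
        have hi1 : ((s.drop (lo + 1)).take (hi - (lo + 1)) ++ [t1, t2, t3, t4]).length - 1
            = ((s.drop (lo + 1)).take (hi - (lo + 1)) ++ [t1, t2, t3]).length + 0 := by
          simp
        rw [hi1] at hp
        rw [hassoc] at hp
        rw [eraseIdx_append_len] at hp
        simpa using hp
      -- the refill
      have hf := mixFill_main s (lo + 1) hi [t1, t2, t3] (by omega) h2 (by simp)
      have hgd : s.getD lo "" = s[lo] := List.getD_eq_getElem s "" hlos
      simp only [ha, Option.getD_some, e1, hb, e2, hcc, e3, List.headD_cons, hgd,
        List.drop_succ_cons]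
      have hgl : ([t0, t1, t2, t3, t4] : List String).getLastD "" = t4 := by simp
      rw [hgl]
      have hB1 : (List.drop 0 ([t1, t2, t3, t4] : List String)).dropLast = [t1, t2, t3] := rfl
      rw [hB1]
      rw [hf.2.2.2.2]
      exact ih ((mixFill s (lo + 1) hi [t1, t2, t3]).1 - (lo + 1))
        (by have := hf.2.1; omega) (lo + 1) (mixFill s (lo + 1) hi [t1, t2, t3]).1
        (mixFill s (lo + 1) hi [t1, t2, t3]).2 _ rfl hf.1 (by have := hf.2.1; omega)
        hf.2.2.1 (hf.2.2.2.1.imp id Eq.symm)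
    · rw [dif_neg (by rw [hwlen]; exact hc), if_neg hc]

-- ===== VERDICT (by name: the statement is the Claim_ definition above) =====
theorem mix_word_spec : Claim_equal_mix_word := by
  intro word_list _
  unfold Spec_mix_word mix_word mix_word_alt
  set s := PySem.List.sorted word_list (fun x => x) with hs
  by_cases h : s.length ≤ 5
  · simp only [h, if_true]
    rw [mixLoopA]
    simp [h]
  · simp only [h, if_false]
    have hkey := loop_equiv s ((s.length - 5) - 0) 0 (s.length - 5) (s.drop (s.length - 5)) []
      rfl (by omega) (by omega) (by simp; omega) (by simp; omega)
    rw [← hkey]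
    simp
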